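-- pv_equiv track=rewrite | github.com/Kavish2040/AudioComic | services/comic_reader.py | _analyze_character_type
-- ===== SOURCE A (Python) =====
-- def _analyze_character_type(speaker: str, text_content: str, text_type: str) -> str:
--     """
--     Analyze character type for enhanced voice selection.
--
--     Args:
--         speaker: Speaker description
--         text_content: Text content
--         text_type: Type of text (speech, narration, etc.)
--
--     Returns:
--         Character type classification
--     """
--     speaker_lower = speaker.lower()
--     text_lower = text_content.lower()
--
--     # Narrator detection
--     if text_type == "narration" or not speaker or "narrator" in speaker_lower:
--         if any(word in text_lower for word in ["scene", "setting", "exterior", "interior", "meanwhile", "later"]):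
--             return "narrator_scene"
--         return "narrator_general"
--
--     # Child character detection (more specific)
--     if any(word in speaker_lower for word in ["child", "kid", "baby", "little", "young", "teenager", "teen"]):
--         return "child"
--
--     # Elderly character detection
--     if any(word in speaker_lower for word in ["old", "elderly", "grandpa", "grandma", "grandfather", "grandmother", "elder"]):
--         return "elderly"
--
--     # Authority figure detection
--     if any(word in speaker_lower for word in ["officer", "police", "captain", "boss", "teacher", "doctor", "professor", "sir", "ma'am"]):
--         return "authority"
--
--     # Villain/antagonist detection
--     if any(word in speaker_lower for word in ["villain", "enemy", "bad", "evil", "dark", "sinister"]):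
--         return "villain"
--
--     # Hero/protagonist detection
--     if any(word in speaker_lower for word in ["hero", "protagonist", "main", "leader"]):
--         return "hero"
--
--     # Gender-based classification
--     if "female" in speaker_lower or any(word in speaker_lower for word in ["woman", "girl", "lady", "mother", "mom", "sister", "aunt"]):
--         return "female"
--     elif "male" in speaker_lower or any(word in speaker_lower for word in ["man", "boy", "guy", "father", "dad", "brother", "uncle"]):
--         return "male"
--
--     # Default to male for unclear cases
--     return "male"
-- ===== SOURCE B (Python) =====
-- SCENE_WORDS = ["scene", "setting", "exterior", "interior", "meanwhile", "later"]
--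
-- CATEGORIES = ["child", "elderly", "authority", "villain", "hero", "female", "male"]
--
-- # One flat keyword -> priority-rank list (rank = index into CATEGORIES).
-- KEYWORD_RANKS = (
--     [(w, 0) for w in ["child", "kid", "baby", "little", "young", "teenager", "teen"]] +
--     [(w, 1) for w in ["old", "elderly", "grandpa", "grandma", "grandfather", "grandmother", "elder"]] +
--     [(w, 2) for w in ["officer", "police", "captain", "boss", "teacher", "doctor", "professor", "sir", "ma'am"]] +
--     [(w, 3) for w in ["villain", "enemy", "bad", "evil", "dark", "sinister"]] +
--     [(w, 4) for w in ["hero", "protagonist", "main", "leader"]] +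
--     [(w, 5) for w in ["female", "woman", "girl", "lady", "mother", "mom", "sister", "aunt"]] +
--     [(w, 6) for w in ["male", "man", "boy", "guy", "father", "dad", "brother", "uncle"]]
-- )
--
--
-- def _analyze_character_type(speaker: str, text_content: str, text_type: str) -> str:
--     speaker_lower = speaker.lower()
--     if text_type == "narration" or not speaker or "narrator" in speaker_lower:
--         text_lower = text_content.lower()
--         if any(word in text_lower for word in SCENE_WORDS):
--             return "narrator_scene"
--         return "narrator_general"
--     # Min-reduction: collect the best (smallest) rank among ALL matching keywords,
--     # defaulting to rank 6 ("male"); no cascade, no early exit.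
--     best = 6
--     for kw, rank in KEYWORD_RANKS:
--         if kw in speaker_lower:
--             best = min(best, rank)
--     return CATEGORIES[best]
-- ===== Notes on version B (the rewrite author's own statement) =====
-- stated objective: alternative
-- what changed: A's cascade of per-group if-blocks with early return is replaced by a min-reduction: one fold over a flat keyword->rank list accumulating the smallest matching rank (default 6), then indexing an ordered category array; this is correct because the first matching group in A's order is exactly the matching group of minimal rank.
import Mathlib
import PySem

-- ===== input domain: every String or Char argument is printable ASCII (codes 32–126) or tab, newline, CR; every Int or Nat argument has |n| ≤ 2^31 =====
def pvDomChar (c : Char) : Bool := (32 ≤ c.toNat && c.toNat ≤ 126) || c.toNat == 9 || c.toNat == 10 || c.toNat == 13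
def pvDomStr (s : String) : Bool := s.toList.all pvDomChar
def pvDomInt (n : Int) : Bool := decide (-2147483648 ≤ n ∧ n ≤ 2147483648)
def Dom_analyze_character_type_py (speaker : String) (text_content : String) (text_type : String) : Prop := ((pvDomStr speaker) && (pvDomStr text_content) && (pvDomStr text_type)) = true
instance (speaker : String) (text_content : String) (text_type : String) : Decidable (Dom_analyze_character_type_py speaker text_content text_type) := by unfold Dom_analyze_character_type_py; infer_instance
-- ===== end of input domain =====

-- B replaces A's early-return branch cascade by a min-rank reduction over one flat keyword list plus a category-array lookup (alternative decomposition, same cost); return value only, no side effects.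

-- ===== PORT A =====
def analyze_character_type_py (speaker : String) (text_content : String) (text_type : String) : String :=
  let speaker_lower := PySem.Str.lower speaker
  let text_lower := PySem.Str.lower text_content
  if text_type == "narration" || speaker == "" || PySem.Str.isIn "narrator" speaker_lower then
    if (["scene", "setting", "exterior", "interior", "meanwhile", "later"] : List String).any
        (fun word => PySem.Str.isIn word text_lower) then "narrator_scene"
    else "narrator_general"
  else if (["child", "kid", "baby", "little", "young", "teenager", "teen"] : List String).any
      (fun word => PySem.Str.isIn word speaker_lower) then "child"
  else if (["old", "elderly", "grandpa", "grandma", "grandfather", "grandmother", "elder"] : List String).any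
      (fun word => PySem.Str.isIn word speaker_lower) then "elderly"
  else if (["officer", "police", "captain", "boss", "teacher", "doctor", "professor", "sir", "ma'am"] : List String).any
      (fun word => PySem.Str.isIn word speaker_lower) then "authority"
  else if (["villain", "enemy", "bad", "evil", "dark", "sinister"] : List String).any
      (fun word => PySem.Str.isIn word speaker_lower) then "villain"
  else if (["hero", "protagonist", "main", "leader"] : List String).any
      (fun word => PySem.Str.isIn word speaker_lower) then "hero"
  else if PySem.Str.isIn "female" speaker_lower ||
      (["woman", "girl", "lady", "mother", "mom", "sister", "aunt"] : List String).any
        (fun word => PySem.Str.isIn word speaker_lower) then "female"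
  else if PySem.Str.isIn "male" speaker_lower ||
      (["man", "boy", "guy", "father", "dad", "brother", "uncle"] : List String).any
        (fun word => PySem.Str.isIn word speaker_lower) then "male"
  else "male"

-- ===== PORT B =====
def pvCategories : List String :=
  ["child", "elderly", "authority", "villain", "hero", "female", "male"]

-- the flat keyword -> rank list KEYWORD_RANKS (built by concatenating the per-rank comprehensions, as in Source B)
def pvKeywordRanks : List (String × Nat) :=
  (["child", "kid", "baby", "little", "young", "teenager", "teen"].map (fun w => (w, 0))) ++
  (["old", "elderly", "grandpa", "grandma", "grandfather", "grandmother", "elder"].map (fun w => (w, 1))) ++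
  (["officer", "police", "captain", "boss", "teacher", "doctor", "professor", "sir", "ma'am"].map (fun w => (w, 2))) ++
  (["villain", "enemy", "bad", "evil", "dark", "sinister"].map (fun w => (w, 3))) ++
  (["hero", "protagonist", "main", "leader"].map (fun w => (w, 4))) ++
  (["female", "woman", "girl", "lady", "mother", "mom", "sister", "aunt"].map (fun w => (w, 5))) ++
  (["male", "man", "boy", "guy", "father", "dad", "brother", "uncle"].map (fun w => (w, 6)))

-- loop body: best = min(best, rank) if kw in speaker_lower
def pvMinStep (speaker_lower : String) (best : Nat) (p : String × Nat) : Nat :=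
  if PySem.Str.isIn p.1 speaker_lower then min best p.2 else best

def analyze_character_type_py_alt (speaker : String) (text_content : String) (text_type : String) : String :=
  let speaker_lower := PySem.Str.lower speaker
  if text_type == "narration" || speaker == "" || PySem.Str.isIn "narrator" speaker_lower then
    let text_lower := PySem.Str.lower text_content
    if (["scene", "setting", "exterior", "interior", "meanwhile", "later"] : List String).any
        (fun word => PySem.Str.isIn word text_lower) then "narrator_scene"
    else "narrator_general"
  else
    let best := pvKeywordRanks.foldl (pvMinStep speaker_lower) 6
    pvCategories.getD best "male"    -- CATEGORIES[best]; exact since best ≤ 6 always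

-- ===== PRECONDITION & SPEC =====
def Spec_analyze_character_type_py (speaker : String) (text_content : String) (text_type : String) (out : String) : Prop := out = analyze_character_type_py_alt speaker text_content text_type
instance (speaker : String) (text_content : String) (text_type : String) (out : String) : Decidable (Spec_analyze_character_type_py speaker text_content text_type out) := by unfold Spec_analyze_character_type_py; infer_instance

-- ===== CLAIM (what is proved, stated in full; the proofs are below) =====
def Claim_equal_analyze_character_type_py : Prop := ∀ (speaker : String) (text_content : String) (text_type : String), Dom_analyze_character_type_py speaker text_content text_type → Spec_analyze_character_type_py speaker text_content text_type (analyze_character_type_py speaker text_content text_type)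

-- ===== LEMMAS AND PROOFS =====

-- one min-step over a whole rank-r keyword group, as a function of the group's 'any' test
def pvG (r : Nat) (b : Bool) (x : Nat) : Nat := if b then min x r else x

-- folding the min-step over one rank-r keyword group collapses to a pvG step on its 'any' test
theorem pv_foldl_group (s : String) (r acc : Nat) (kws : List String) :
    (kws.map (fun kw => (kw, r))).foldl (pvMinStep s) acc
      = pvG r (kws.any (fun kw => PySem.Str.isIn kw s)) acc := by
  induction kws generalizing acc with
  | nil => rfl
  | cons k t ih =>
    simp only [List.map_cons, List.foldl_cons, List.any_cons, pvMinStep]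
    by_cases h : PySem.Str.isIn k s = true
    · rw [if_pos h, ih, h, Bool.true_or]
      unfold pvG
      by_cases h2 : (t.any fun kw => PySem.Str.isIn kw s) = true
      · rw [if_pos h2, if_pos rfl, Nat.min_assoc, Nat.min_self]
      · rw [if_neg h2, if_pos rfl]
    · have hf : PySem.Str.isIn k s = false := by
        cases hh : PySem.Str.isIn k s
        · rfl
        · exact absurd hh h
      rw [if_neg h, ih, hf, Bool.false_or]

-- the category of minimal matched rank (default 6) is the first group that matches (A's cascade order)
theorem pv_key (b0 b1 b2 b3 b4 b5 b6 : Bool) :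
    (if b0 then "child"
     else if b1 then "elderly"
     else if b2 then "authority"
     else if b3 then "villain"
     else if b4 then "hero"
     else if b5 then "female"
     else if b6 then "male"
     else "male")
    = pvCategories.getD (pvG 6 b6 (pvG 5 b5 (pvG 4 b4 (pvG 3 b3 (pvG 2 b2 (pvG 1 b1 (pvG 0 b0 6))))))) "male" := by
  revert b0 b1 b2 b3 b4 b5 b6
  decide

-- ===== VERDICT (by name: the statement is the Claim_ definition above) =====
set_option maxHeartbeats 1000000 in
theorem analyze_character_type_py_spec : Claim_equal_analyze_character_type_py := by
  intro speaker text_content text_type _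
  unfold Spec_analyze_character_type_py analyze_character_type_py analyze_character_type_py_alt
  simp only [pvKeywordRanks, List.foldl_append, pv_foldl_group, List.any_cons, List.any_nil]
  by_cases h : (text_type == "narration" || speaker == "" || PySem.Str.isIn "narrator" (PySem.Str.lower speaker)) = true
  · rw [if_pos h, if_pos h]
  · rw [if_neg h, if_neg h]
    exact pv_key _ _ _ _ _ _ _
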